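-- pv_equiv track=rewrite | github.com/linnal/Katas | the_last_word/the_last_word.py | extract_last_word
-- ===== SOURCE A (Python) =====
-- def extract_last_word(word):
--     result = ""
--     for c in word:
--         if len(result) == 0:
--             result += c
--         else:
--             result = c + result if result[0] <= c \
--                      else result + c
--     return result
-- ===== SOURCE B (Python) =====
-- def extract_last_word(word):
--     maxes = []
--     for c in word:
--         maxes.append(c if not maxes or c > maxes[-1] else maxes[-1])
--     records = [c for c, m in zip(word, maxes) if c == m]
--     others = [c for c, m in zip(word, maxes) if c != m]
--     return ''.join(sorted(records, reverse=True)) + ''.join(others)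
-- ===== Notes on version B (the rewrite author's own statement) =====
-- stated objective: alternative
-- what changed: Replaces A's online two-ended string building (prepend when >= current head, else append) with three staged passes: a prefix-maximum array, a partition of chars by equality with that array into records and non-records, and a descending sort of the records in place of A's back-to-front construction (valid because the records are nondecreasing).
import Mathlib
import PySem

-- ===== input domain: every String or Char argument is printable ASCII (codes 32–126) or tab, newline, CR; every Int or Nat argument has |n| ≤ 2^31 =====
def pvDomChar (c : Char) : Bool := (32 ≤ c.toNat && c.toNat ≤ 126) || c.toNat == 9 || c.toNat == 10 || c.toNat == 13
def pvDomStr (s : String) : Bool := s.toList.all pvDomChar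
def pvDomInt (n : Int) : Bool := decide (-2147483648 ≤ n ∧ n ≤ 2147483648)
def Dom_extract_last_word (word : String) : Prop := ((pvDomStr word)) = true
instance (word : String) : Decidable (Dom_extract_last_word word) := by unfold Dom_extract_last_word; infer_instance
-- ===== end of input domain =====

-- B replaces A's online prepend/append string building by three staged passes: a
-- prefix-maximum array, an equality partition against it into records and non-records,
-- and a descending sort of the records (valid since the records are nondecreasing).

-- ===== PORT A =====
-- A's loop body: prepend when result[0] <= c, else append (result as List Char).
def pvStepA (result : List Char) (c : Char) : List Char :=
  if result.length = 0 then result ++ [c]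
  else if result.head! ≤ c then c :: result
  else result ++ [c]

def extract_last_word (word : String) : String :=
  String.mk (word.toList.foldl pvStepA [])

-- ===== PORT B =====
-- maxes.append(c if not maxes or c > maxes[-1] else maxes[-1]); the short-circuit
-- 'not maxes or …' is ported as a nested if, so getLast! is only read when nonempty.
def pvScanStep (acc : List Char) (c : Char) : List Char :=
  acc ++ [if acc.isEmpty then c else if acc.getLast! < c then c else acc.getLast!]

def pvMaxes (l : List Char) : List Char := l.foldl pvScanStep []

-- records = [c for c, m in zip(word, maxes) if c == m]
def pvRecords (l : List Char) : List Char :=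
  ((l.zip (pvMaxes l)).filter (fun q => q.1 == q.2)).map Prod.fst

-- others = [c for c, m in zip(word, maxes) if c != m]
def pvOthers (l : List Char) : List Char :=
  ((l.zip (pvMaxes l)).filter (fun q => !(q.1 == q.2))).map Prod.fst

def extract_last_word_alt (word : String) : String :=
  String.mk (PySem.List.sorted (pvRecords word.toList) (fun x => x) true
             ++ pvOthers word.toList)

-- ===== PRECONDITION & SPEC =====
def Spec_extract_last_word (word : String) (out : String) : Prop := out = extract_last_word_alt word
instance (word : String) (out : String) : Decidable (Spec_extract_last_word word out) := by unfold Spec_extract_last_word; infer_instance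

-- ===== CLAIM (what is proved, stated in full; the proofs are below) =====
def Claim_equal_extract_last_word : Prop := ∀ (word : String), Dom_extract_last_word word → Spec_extract_last_word word (extract_last_word word)

-- ===== LEMMAS AND PROOFS =====

-- The scan: its length matches, and when l is nonempty it ends with a maximum of l.
lemma pvScan_inv (l : List Char) :
    (pvMaxes l).length = l.length ∧
    (l ≠ [] → ∃ mv t, pvMaxes l = t ++ [mv] ∧ mv ∈ l ∧ ∀ d ∈ l, d ≤ mv) := by
  induction l using List.reverseRecOn with
  | nil => simp [pvMaxes]
  | append_singleton p c ih =>
    obtain ⟨hlen, hmax⟩ := ih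
    have hstep : pvMaxes (p ++ [c]) = pvScanStep (pvMaxes p) c := by
      unfold pvMaxes
      rw [List.foldl_append, List.foldl_cons, List.foldl_nil]
    by_cases hp : p = []
    · subst hp
      constructor
      · simp [pvMaxes, pvScanStep]
      · intro _
        exact ⟨c, [], by simp [pvMaxes, pvScanStep], by simp, by simp⟩
    · obtain ⟨mv, t, hM, hmem, hall⟩ := hmax hp
      have hne : (pvMaxes p).isEmpty = false := by
        rw [hM]; simp
      have hlast : (pvMaxes p).getLast! = mv := by
        rw [hM]; simp
      constructor
      · rw [hstep, pvScanStep]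
        simp [hlen]
      · intro _
        by_cases hlt : mv < c
        · refine ⟨c, pvMaxes p, ?_, by simp, ?_⟩
          · rw [hstep, pvScanStep, hne, hlast]
            simp [hlt]
          · intro d hd
            rcases List.mem_append.1 hd with h | h
            · exact le_of_lt (lt_of_le_of_lt (hall d h) hlt)
            · simp at h; subst h; exact le_refl _
        · refine ⟨mv, pvMaxes p, ?_, List.mem_append.2 (Or.inl hmem), ?_⟩
          · rw [hstep, pvScanStep, hne, hlast]
            simp [hlt]
          · intro d hd
            rcases List.mem_append.1 hd with h | h
            · exact hall d h
            · simp at h; subst h; exact not_lt.1 hlt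

-- The new scan entry for p ++ [c] equals c exactly when c dominates all of p.
lemma pvScan_last_eq (p : List Char) (c : Char) :
    ∃ nm, pvMaxes (p ++ [c]) = pvMaxes p ++ [nm] ∧
      ((c == nm) = p.all (fun d => d ≤ c)) := by
  have hstep : pvMaxes (p ++ [c]) = pvScanStep (pvMaxes p) c := by
    unfold pvMaxes
    rw [List.foldl_append, List.foldl_cons, List.foldl_nil]
  by_cases hp : p = []
  · subst hp
    exact ⟨c, by simp [pvMaxes, pvScanStep], by simp⟩
  · obtain ⟨-, hmax⟩ := pvScan_inv p
    obtain ⟨mv, t, hM, hmem, hall⟩ := hmax hp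
    have hne : (pvMaxes p).isEmpty = false := by rw [hM]; simp
    have hlast : (pvMaxes p).getLast! = mv := by
      rw [hM]; simp
    refine ⟨if mv < c then c else mv, ?_, ?_⟩
    · rw [hstep, pvScanStep, hne, hlast]
      simp
    · by_cases hK : p.all (fun d => d ≤ c) = true
      · have hmc : mv ≤ c := by simpa using List.all_eq_true.1 hK mv hmem
        by_cases hlt : mv < c
        · simp [hlt, hK]
        · have : mv = c := le_antisymm hmc (not_lt.1 hlt)
          simp [hlt, hK, this]
      · have : ∃ d ∈ p, ¬ d ≤ c := by
          by_contra h
          push_neg at h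
          exact hK (List.all_eq_true.2 (fun d hd => decide_eq_true (h d hd)))
        obtain ⟨d, hd, hdc⟩ := this
        have hcm : c < mv := lt_of_lt_of_le (not_le.1 hdc) (hall d hd)
        have hlt : ¬ mv < c := not_lt.2 (le_of_lt hcm)
        rw [if_neg hlt, Bool.eq_false_iff.2 hK]
        simp [ne_of_lt hcm]

-- zip of p ++ [c] with the scan splits into the zip over p plus the new pair.
lemma pv_zip_append (p : List Char) (c : Char) (nm : Char)
    (h : pvMaxes (p ++ [c]) = pvMaxes p ++ [nm]) :
    (p ++ [c]).zip (pvMaxes (p ++ [c])) = p.zip (pvMaxes p) ++ [(c, nm)] := by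
  rw [h, List.zip_append (by simpa using (pvScan_inv p).1.symm)]
  simp

-- Step lemma: records of p ++ [c] append c exactly when c dominates all of p.
lemma pvRecords_append (p : List Char) (c : Char) :
    pvRecords (p ++ [c]) = pvRecords p ++ (if p.all (fun d => d ≤ c) then [c] else []) := by
  obtain ⟨nm, hnm, hkeep⟩ := pvScan_last_eq p c
  unfold pvRecords
  rw [pv_zip_append p c nm hnm, List.filter_append, List.map_append]
  cases hA : p.all (fun d => d ≤ c) <;>
    simp [List.filter, hkeep, hA]

lemma pvOthers_append (p : List Char) (c : Char) :
    pvOthers (p ++ [c]) = pvOthers p ++ (if p.all (fun d => d ≤ c) then [] else [c]) := by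
  obtain ⟨nm, hnm, hkeep⟩ := pvScan_last_eq p c
  unfold pvOthers
  rw [pv_zip_append p c nm hnm, List.filter_append, List.map_append]
  cases hA : p.all (fun d => d ≤ c) <;>
    simp [List.filter, hkeep, hA]

-- Main invariant, by induction from the right: A's fold equals reverse(records) ++ others,
-- the records are nondecreasing and drawn from l, and when l ≠ [] the head of A's result
-- (= last record) dominates all of l.
lemma pv_main (l : List Char) :
    l.foldl pvStepA [] = (pvRecords l).reverse ++ pvOthers l ∧
    (pvRecords l).Pairwise (· ≤ ·) ∧
    (∀ x ∈ pvRecords l, x ∈ l) ∧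
    (l ≠ [] → ∃ m t, (pvRecords l).reverse = m :: t ∧ ∀ d ∈ l, d ≤ m) := by
  induction l using List.reverseRecOn with
  | nil => refine ⟨rfl, ?_, ?_, ?_⟩ <;> simp [pvRecords, pvMaxes]
  | append_singleton p c ih =>
    obtain ⟨hG, hPW, hSub, hMax⟩ := ih
    rw [List.foldl_append, List.foldl_cons, List.foldl_nil, hG]
    by_cases hp : p = []
    · subst hp
      refine ⟨?_, ?_, ?_, ?_⟩ <;>
        simp [pvRecords, pvOthers, pvMaxes, pvScanStep, pvStepA, List.filter]
    · obtain ⟨m, t, hrev, hm⟩ := hMax hp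
      have hmem : m ∈ pvRecords p := by
        have : m ∈ (pvRecords p).reverse := by rw [hrev]; exact List.mem_cons_self ..
        simpa using this
      by_cases hK : p.all (fun d => d ≤ c) = true
      · -- c dominates p: A prepends, B appends to records
        have hall : ∀ d ∈ p, d ≤ c := fun d hd => by
          simpa using List.all_eq_true.1 hK d hd
        have hmc : m ≤ c := hall m (hSub m hmem)
        have hA : pvStepA ((pvRecords p).reverse ++ pvOthers p) c =
            c :: ((pvRecords p).reverse ++ pvOthers p) := by
          rw [pvStepA, hrev]
          simp [hmc]
        refine ⟨?_, ?_, ?_, ?_⟩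
        · rw [hA, pvRecords_append, pvOthers_append, if_pos hK, if_pos hK]
          simp [hrev]
        · rw [pvRecords_append, if_pos hK]
          refine List.pairwise_append.2 ⟨hPW, by simp, ?_⟩
          intro x hx y hy
          simp at hy; subst hy
          exact hall x (hSub x hx)
        · rw [pvRecords_append, if_pos hK]
          intro x hx
          rcases List.mem_append.1 hx with h | h
          · exact List.mem_append.2 (Or.inl (hSub x h))
          · simp at h; subst h; simp
        · intro _
          refine ⟨c, (pvRecords p).reverse, ?_, ?_⟩
          · rw [pvRecords_append, if_pos hK]; simp
          · intro d hd
            rcases List.mem_append.1 hd with h | h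
            · exact hall d h
            · simp at h; subst h; exact le_refl _
      · -- c does not dominate p: A appends, B appends to others
        have hmc : ¬ m ≤ c := by
          intro hle
          exact hK (List.all_eq_true.2
            (fun d hd => decide_eq_true (le_trans (hm d hd) hle)))
        have hA : pvStepA ((pvRecords p).reverse ++ pvOthers p) c =
            ((pvRecords p).reverse ++ pvOthers p) ++ [c] := by
          rw [pvStepA, hrev]
          simp [hmc]
        refine ⟨?_, ?_, ?_, ?_⟩
        · rw [hA, pvRecords_append, pvOthers_append, if_neg hK, if_neg hK]
          simp
        · rw [pvRecords_append, if_neg hK]; simpa using hPW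
        · rw [pvRecords_append, if_neg hK]
          intro x hx
          simp only [List.append_nil] at hx
          exact List.mem_append.2 (Or.inl (hSub x hx))
        · intro _
          refine ⟨m, t, ?_, ?_⟩
          · rw [pvRecords_append, if_neg hK]; simpa using hrev
          · intro d hd
            rcases List.mem_append.1 hd with h | h
            · exact hm d h
            · simp at h; subst h; exact (not_le.1 hmc).le

-- A nondecreasing record list sorted in descending order is its reversal
-- (equal chars are identical, so stability does not matter).
lemma pv_sorted_eq_reverse (L : List Char) (h : L.Pairwise (· ≤ ·)) :
    PySem.List.sorted L (fun x => x) true = L.reverse := by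
  apply List.Perm.eq_of_pairwise (le := fun a b : Char => b ≤ a)
  · exact fun a b _ _ h1 h2 => le_antisymm h2 h1
  · exact PySem.List.sorted_pairwise_rev L (fun x => x)
  · exact (List.pairwise_reverse).2 (by simpa using h)
  · exact (PySem.List.sorted_perm L (fun x => x) true).trans (List.reverse_perm L).symm

-- ===== VERDICT (by name: the statement is the Claim_ definition above) =====
theorem extract_last_word_spec : Claim_equal_extract_last_word := by
  intro word _
  unfold Spec_extract_last_word extract_last_word extract_last_word_alt
  obtain ⟨hG, hPW, -, -⟩ := pv_main word.toList
  rw [hG, pv_sorted_eq_reverse _ hPW]
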